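-- pv_equiv track=rewrite | github.com/realZillionX/InspireSkill | cli/inspire/config/env.py | _parse_denylist
-- ===== SOURCE A (Python) =====
-- from typing import Optional
--
-- def _parse_denylist(value: Optional[str]) -> list[str]:
--     """Parse denylist from env (comma or newline separated)."""
--     if not value:
--         return []
--     parts: list[str] = []
--     for raw in value.replace("\r", "").split("\n"):
--         for chunk in raw.split(","):
--             item = chunk.strip()
--             if item:
--                 parts.append(item)
--     return parts
-- ===== SOURCE B (Python) =====
-- from typing import Optional
--
--
-- def _parse_denylist(value: Optional[str]) -> list[str]:
--     """Parse denylist from env (comma or newline separated)."""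
--     if not value:
--         return []
--     parts: list[str] = []
--     token: list[str] = []
--     for ch in value + "\n":
--         if ch == "\r":
--             continue
--         if ch == "\n" or ch == ",":
--             item = "".join(token).strip()
--             if item:
--                 parts.append(item)
--             token = []
--         else:
--             token.append(ch)
--     return parts
-- ===== Notes on version B (the rewrite author's own statement) =====
-- stated objective: alternative
-- what changed: Replaced the replace+nested newline-then-comma split loops by a single character scan that skips CRs, cuts tokens at newline or comma, and flushes each stripped non-empty token in one pass.
import Mathlib
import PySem

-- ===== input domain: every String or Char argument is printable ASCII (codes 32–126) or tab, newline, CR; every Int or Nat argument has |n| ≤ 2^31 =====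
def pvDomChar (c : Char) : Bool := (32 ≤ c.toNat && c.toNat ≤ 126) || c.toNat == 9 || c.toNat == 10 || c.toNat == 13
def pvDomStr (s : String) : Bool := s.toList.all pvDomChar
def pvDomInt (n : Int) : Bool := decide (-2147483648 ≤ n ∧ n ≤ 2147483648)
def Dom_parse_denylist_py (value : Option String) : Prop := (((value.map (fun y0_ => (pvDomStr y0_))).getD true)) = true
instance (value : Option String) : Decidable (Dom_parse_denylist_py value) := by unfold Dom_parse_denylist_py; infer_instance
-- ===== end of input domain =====

-- B is an alternative single-pass character scan; same O(n) cost, flat one-pass structure instead of nested splits.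

-- ===== PORT A =====
-- literal transliteration of A: guard, replace("\r",""), split("\n"), inner split(","), strip, append if non-empty
def parse_denylist_py (value : Option String) : List String :=
  match value with
  | none => []
  | some v =>
    if v = "" then []
    else
      (PySem.Chars.splitOn (PySem.Chars.replace v.toList ['\r'] []) ['\n']).foldl
        (fun parts raw =>
          (PySem.Chars.splitOn raw [',']).foldl
            (fun parts chunk =>
              let item := PySem.Chars.strip chunk
              if item ≠ [] then parts ++ [String.mk item] else parts)
            parts)
        []

-- ===== PORT B =====
-- literal transliteration of Source B: one scan over value + "\n" with a (parts, token) state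
def pyB_step (st : List String × List Char) (ch : Char) : List String × List Char :=
  if ch = '\r' then st
  else if ch = '\n' ∨ ch = ',' then
    let item := PySem.Chars.strip st.2
    ((if item ≠ [] then st.1 ++ [String.mk item] else st.1), [])
  else (st.1, st.2 ++ [ch])

def parse_denylist_py_alt (value : Option String) : List String :=
  match value with
  | none => []
  | some v =>
    if v = "" then []
    else ((v.toList ++ ['\n']).foldl pyB_step ([], [])).1

-- ===== PRECONDITION & SPEC =====
def Spec_parse_denylist_py (value : Option String) (out : List String) : Prop := out = parse_denylist_py_alt value
instance (value : Option String) (out : List String) : Decidable (Spec_parse_denylist_py value out) := by unfold Spec_parse_denylist_py; infer_instance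

-- ===== CLAIM (what is proved, stated in full; the proofs are below) =====
def Claim_equal_parse_denylist_py : Prop := ∀ (value : Option String), Dom_parse_denylist_py value → Spec_parse_denylist_py value (parse_denylist_py value)

-- ===== LEMMAS AND PROOFS =====

-- abbreviations used only in the proofs
def pvKeep (cs : List Char) : Bool := decide (PySem.Chars.strip cs ≠ [])
def pvOut (cs : List Char) : String := String.mk (PySem.Chars.strip cs)
def pvDelim (c : Char) : Bool := (c == '\n') || (c == ',')

theorem modifyHead_fun_id {α : Type} (l : List (List α)) : l.modifyHead (fun x => x) = l := by
  cases l <;> simp [List.modifyHead]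

theorem modifyHead_append_of_ne_nil {α : Type} (f : List α → List α) (u v : List (List α))
    (h : u ≠ []) : (u ++ v).modifyHead f = u.modifyHead f ++ v := by
  cases u with
  | nil => exact absurd rfl h
  | cons a u => simp [List.modifyHead]

-- replace with empty replacement deletes every occurrence of the single char
theorem replace_go_single (a : Char) :
    ∀ (fuel : Nat) (l acc : List Char), l.length ≤ fuel →
      PySem.Chars.replace.go [a] [] fuel l acc
        = acc.reverse ++ l.filter (fun c => !(c == a)) := by
  intro fuel
  induction fuel with
  | zero =>
    intro l acc h
    have : l = [] := List.eq_nil_of_length_eq_zero (Nat.le_zero.mp h)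
    subst this
    simp [PySem.Chars.replace.go]
  | succ n ih =>
    intro l acc h
    cases l with
    | nil => simp [PySem.Chars.replace.go]
    | cons c t =>
      simp only [PySem.Chars.replace.go]
      by_cases hc : c = a
      · subst hc
        simp only [List.isPrefixOf, List.isPrefixOf_nil_left, Bool.and_true, beq_self_eq_true,
          if_pos]
        simp only [List.length_cons, List.length_nil, List.drop_succ_cons, List.drop_zero,
          List.reverse_nil, List.nil_append]
        rw [ih t acc (by simpa using h)]
        simp
      · have : ([a].isPrefixOf (c :: t)) = false := by
          simp [List.isPrefixOf]
          exact fun hh => absurd hh.symm hc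
        rw [if_neg (by simp [this])]
        rw [ih t (c :: acc) (by simpa using h)]
        simp [hc]

theorem replace_single (a : Char) (l : List Char) :
    PySem.Chars.replace l [a] [] = l.filter (fun c => !(c == a)) := by
  have := replace_go_single a l.length l [] (le_refl _)
  simpa [PySem.Chars.replace] using this

-- splitOn with a single-char separator is List.splitOnP
theorem splitOn_go_single (a : Char) :
    ∀ (fuel : Nat) (l cur : List Char) (acc : List (List Char)), l.length ≤ fuel →
      PySem.Chars.splitOn.go [a] fuel l cur acc
        = acc.reverse ++ (List.splitOnP (fun c => c == a) l).modifyHead (cur.reverse ++ ·) := by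
  intro fuel
  induction fuel with
  | zero =>
    intro l cur acc h
    have : l = [] := List.eq_nil_of_length_eq_zero (Nat.le_zero.mp h)
    subst this
    simp [PySem.Chars.splitOn.go, List.splitOnP_nil, List.modifyHead]
  | succ n ih =>
    intro l cur acc h
    cases l with
    | nil => simp [PySem.Chars.splitOn.go, List.splitOnP_nil, List.modifyHead]
    | cons c t =>
      simp only [PySem.Chars.splitOn.go]
      by_cases hc : c = a
      · subst hc
        simp only [List.isPrefixOf, List.isPrefixOf_nil_left, Bool.and_true, beq_self_eq_true,
          if_pos]
        simp only [List.length_cons, List.length_nil, List.drop_succ_cons, List.drop_zero]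
        rw [ih t [] (cur.reverse :: acc) (by simpa using h)]
        simp only [List.splitOnP_cons, beq_self_eq_true, if_pos, List.reverse_cons,
          List.reverse_nil, List.nil_append, List.modifyHead, List.append_assoc,
          List.cons_append, List.singleton_append]
        split <;> simp_all
      · have hpre : ([a].isPrefixOf (c :: t)) = false := by
          simp [List.isPrefixOf]
          exact fun hh => absurd hh.symm hc
        rw [if_neg (by simp [hpre])]
        rw [ih t (c :: cur) acc (by simpa using h)]
        rw [List.splitOnP_cons, if_neg (by simp [hc])]
        obtain ⟨h0, tl, hsp⟩ : ∃ h0 tl, List.splitOnP (fun c => c == a) t = h0 :: tl := by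
          cases hsp : List.splitOnP (fun c => c == a) t with
          | nil => exact absurd hsp (List.splitOnP_ne_nil _ _)
          | cons h0 tl => exact ⟨h0, tl, rfl⟩
        rw [hsp]
        simp [List.modifyHead]

theorem splitOn_single (a : Char) (l : List Char) :
    PySem.Chars.splitOn l [a] = List.splitOnP (fun c => c == a) l := by
  have := splitOn_go_single a (l.length + 1) l [] [] (by omega)
  simp only [PySem.Chars.splitOn, this, List.reverse_nil, List.nil_append]
  cases hsp : List.splitOnP (fun c => c == a) l with
  | nil => exact absurd hsp (List.splitOnP_ne_nil _ _)
  | cons h0 tl => simp [List.modifyHead]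

-- splitting on '\n' then each piece on ',' is one split on both delimiters
theorem splitOnP_flatMap (q r : Char → Bool) (l : List Char) :
    (List.splitOnP q l).flatMap (List.splitOnP r)
      = List.splitOnP (fun c => q c || r c) l := by
  induction l with
  | nil => simp [List.splitOnP_nil]
  | cons c t ih =>
    rw [List.splitOnP_cons, List.splitOnP_cons]
    by_cases hq : q c
    · simp only [hq, if_pos, Bool.true_or, List.flatMap_cons, List.splitOnP_nil]
      simp [ih]
    · simp only [hq, Bool.false_eq_true, if_false, Bool.false_or]
      obtain ⟨h0, tl, hsp⟩ : ∃ h0 tl, List.splitOnP q t = h0 :: tl := by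
        cases hsp : List.splitOnP q t with
        | nil => exact absurd hsp (List.splitOnP_ne_nil _ _)
        | cons h0 tl => exact ⟨h0, tl, rfl⟩
      rw [hsp, List.modifyHead, List.flatMap_cons, List.splitOnP_cons]
      have := ih
      rw [hsp, List.flatMap_cons] at this
      by_cases hr : r c
      · rw [if_pos hr, if_pos hr]
        simp [this]
      · rw [if_neg (by simp [hr]), if_neg (by simp [hr])]
        rw [← this]
        exact (modifyHead_append_of_ne_nil _ _ _ (List.splitOnP_ne_nil _ _)).symm

-- the scan invariant for B
theorem scan_invariant :
    ∀ (l : List Char) (parts : List String) (token : List Char),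
      ((l ++ ['\n']).foldl pyB_step (parts, token)).1
        = parts ++ ((((List.splitOnP pvDelim (l.filter (fun c => !(c == '\r')))).modifyHead
            (token ++ ·)).filter pvKeep).map pvOut) := by
  intro l
  induction l with
  | nil =>
    intro parts token
    simp [pyB_step, List.splitOnP_nil, List.modifyHead, pvDelim, pvKeep, pvOut, List.filter,
      List.map]
    by_cases h : PySem.Chars.strip token = []
    · simp [h]
    · simp [h, pvOut]
  | cons c t ih =>
    intro parts token
    by_cases hr : c = '\r'
    · subst hr
      simp only [List.cons_append, List.foldl_cons]
      rw [show pyB_step (parts, token) '\r' = (parts, token) from by simp [pyB_step]]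
      rw [ih parts token]
      simp
    · by_cases hd : c = '\n' ∨ c = ','
      · have hstep : pyB_step (parts, token) c
            = ((if PySem.Chars.strip token ≠ [] then parts ++ [String.mk (PySem.Chars.strip token)] else parts), []) := by
          simp [pyB_step, hr, hd]
        simp only [List.cons_append, List.foldl_cons, hstep]
        rw [ih _ []]
        have hpd : pvDelim c = true := by
          rcases hd with h | h <;> simp [pvDelim, h]
        have hfil : List.filter (fun c => !(c == '\r')) (c :: t)
            = c :: List.filter (fun c => !(c == '\r')) t := by
          rw [List.filter_cons]; simp [hr]
        rw [hfil, List.splitOnP_cons, hpd]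
        simp only [if_pos]
        rw [List.modifyHead, List.filter_cons]
        by_cases hk : PySem.Chars.strip token = []
        · simp [pvKeep, hk, modifyHead_fun_id]
        · simp [pvKeep, hk, pvOut, modifyHead_fun_id]
      · have hstep : pyB_step (parts, token) c = (parts, token ++ [c]) := by
          simp [pyB_step, hr, hd]
        simp only [List.cons_append, List.foldl_cons, hstep]
        rw [ih parts (token ++ [c])]
        have hpd : pvDelim c = false := by
          rw [not_or] at hd
          simp [pvDelim, hd.1, hd.2]
        have hfil : List.filter (fun c => !(c == '\r')) (c :: t)
            = c :: List.filter (fun c => !(c == '\r')) t := by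
          rw [List.filter_cons]; simp [hr]
        rw [hfil, List.splitOnP_cons, hpd]
        simp only [Bool.false_eq_true, if_false]
        obtain ⟨h0, tl, hsp⟩ : ∃ h0 tl,
            List.splitOnP pvDelim (t.filter (fun c => !(c == '\r'))) = h0 :: tl := by
          cases hsp : List.splitOnP pvDelim (t.filter (fun c => !(c == '\r'))) with
          | nil => exact absurd hsp (List.splitOnP_ne_nil _ _)
          | cons h0 tl => exact ⟨h0, tl, rfl⟩
        rw [hsp]
        simp [List.modifyHead]

-- ===== VERDICT (by name: the statement is the Claim_ definition above) =====
theorem parse_denylist_py_spec : Claim_equal_parse_denylist_py := by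
  intro value _
  cases value with
  | none => rfl
  | some v =>
    simp only [Spec_parse_denylist_py, parse_denylist_py, parse_denylist_py_alt]
    by_cases hv : v = ""
    · simp [hv]
    · rw [if_neg hv, if_neg hv]
      rw [scan_invariant v.toList [] []]
      simp only [List.nil_append, modifyHead_fun_id]
      -- reduce A's nested foldl to a flatMap, then to one splitOnP
      rw [replace_single '\r' v.toList, splitOn_single '\n']
      have hinner : ∀ (parts : List String) (raw : List Char),
          (PySem.Chars.splitOn raw [',']).foldl
            (fun parts chunk =>
              let item := PySem.Chars.strip chunk
              if item ≠ [] then parts ++ [String.mk item] else parts) parts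
          = parts ++ ((List.splitOnP (fun c => c == ',') raw).filter pvKeep).map pvOut := by
        intro parts raw
        rw [splitOn_single ',']
        rw [PySem.List.foldl_append_ite (fun chunk => PySem.Chars.strip chunk ≠ [])
          (fun chunk => String.mk (PySem.Chars.strip chunk))]
        rfl
      calc (List.splitOnP (fun c => c == '\n') (v.toList.filter fun c => !(c == '\r'))).foldl
            (fun parts raw =>
              (PySem.Chars.splitOn raw [',']).foldl
                (fun parts chunk =>
                  let item := PySem.Chars.strip chunk
                  if item ≠ [] then parts ++ [String.mk item] else parts) parts) []
          = (List.splitOnP (fun c => c == '\n') (v.toList.filter fun c => !(c == '\r'))).foldl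
              (fun parts raw =>
                parts ++ ((List.splitOnP (fun c => c == ',') raw).filter pvKeep).map pvOut) [] := by
            exact PySem.List.foldl_congr_mem _ _ _ _ (fun acc x _ => hinner acc x)
        _ = (List.splitOnP (fun c => c == '\n') (v.toList.filter fun c => !(c == '\r'))).flatMap
              (fun raw => ((List.splitOnP (fun c => c == ',') raw).filter pvKeep).map pvOut) := by
            rw [PySem.List.foldl_append_eq_flatMap]; rfl
        _ = ((List.splitOnP pvDelim (v.toList.filter fun c => !(c == '\r'))).filter pvKeep).map pvOut := by
            unfold pvDelim
            rw [← splitOnP_flatMap (fun c => c == '\n') (fun c => c == ','),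
              List.filter_flatMap, List.map_flatMap]
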